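-- pv_equiv track=rewrite | github.com/mnhat19/AVE | ave/export/markdown_exporter.py | _build_anomaly_rows
-- ===== SOURCE A (Python) =====
-- from typing import Any, Dict, List, Optional
--
-- _SEVERITY_ORDER = {"high": 0, "medium": 1, "low": 2}
--
-- def _escape_md(value: Any) -> str:
--     text = "" if value is None else str(value)
--     text = text.replace("|", "\\|")
--     text = text.replace("\n", " ").replace("\r", " ")
--     return text
--
-- def _severity_sort_key(value: str) -> int:
--     return _SEVERITY_ORDER.get(value, 99)
--
-- def _build_anomaly_rows(anomalies: List[Dict[str, Any]]) -> List[List[str]]: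
--     if not anomalies:
--         return []
--
--     sorted_items = sorted(
--         anomalies,
--         key=lambda item: (
--             _severity_sort_key(str(item.get("severity", ""))),
--             int(item.get("row_index") or 0),
--         ),
--     )
--
--     display_items = sorted_items
--     if len(sorted_items) > 100:
--         display_items = sorted_items[:50]
--
--     rows: List[List[str]] = []
--     for item in display_items:
--         row_index = _escape_md(item.get("row_index"))
--         rule_id = _escape_md(item.get("rule_id") or "LLM")
--         description = _escape_md(item.get("rule_name") or item.get("reasoning"))
--         severity = _escape_md(item.get("severity"))
--         actual_value = _escape_md(item.get("actual_value"))
--         rows.append([row_index, rule_id, description, severity, actual_value])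
--
--     return rows
-- ===== SOURCE B (Python) =====
-- from typing import Any, Dict, List
--
-- def _build_anomaly_rows(anomalies: List[Dict[str, Any]]) -> List[List[str]]:
--     # LSD radix approach: stable sort by the secondary key (row_index) first,
--     # then one stable bucketing pass by severity; concatenate buckets in
--     # severity order. Same order as the composite-key sort.
--     by_row = sorted(anomalies, key=lambda it: int(it.get("row_index") or 0))
--     high, med, low, other = [], [], [], []
--     for it in by_row:
--         sev = str(it.get("severity", ""))
--         if sev == "high":
--             high.append(it)
--         elif sev == "medium":
--             med.append(it)
--         elif sev == "low":
--             low.append(it)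
--         else:
--             other.append(it)
--     ordered = high + med + low + other
--     if len(ordered) > 100:
--         ordered = ordered[:50]
--     rows = []
--     for it in ordered:
--         row = []
--         for raw in (it.get("row_index"),
--                     it.get("rule_id") or "LLM",
--                     it.get("rule_name") or it.get("reasoning"),
--                     it.get("severity"),
--                     it.get("actual_value")):
--             text = "" if raw is None else str(raw)
--             row.append(text.replace("|", "\\|").replace("\n", " ").replace("\r", " "))
--         rows.append(row)
--     return rows
-- ===== Notes on version B (the rewrite author's own statement) =====
-- stated objective: alternative
-- what changed: Replaces A's single composite-key (severity, row_index) sort by an LSD radix scheme: one stable sort on row_index alone followed by a single stable bucketing pass on severity, buckets concatenated in severity order; rows are then built by an explicit per-field inner loop instead of A's five named variables.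
import Mathlib
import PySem

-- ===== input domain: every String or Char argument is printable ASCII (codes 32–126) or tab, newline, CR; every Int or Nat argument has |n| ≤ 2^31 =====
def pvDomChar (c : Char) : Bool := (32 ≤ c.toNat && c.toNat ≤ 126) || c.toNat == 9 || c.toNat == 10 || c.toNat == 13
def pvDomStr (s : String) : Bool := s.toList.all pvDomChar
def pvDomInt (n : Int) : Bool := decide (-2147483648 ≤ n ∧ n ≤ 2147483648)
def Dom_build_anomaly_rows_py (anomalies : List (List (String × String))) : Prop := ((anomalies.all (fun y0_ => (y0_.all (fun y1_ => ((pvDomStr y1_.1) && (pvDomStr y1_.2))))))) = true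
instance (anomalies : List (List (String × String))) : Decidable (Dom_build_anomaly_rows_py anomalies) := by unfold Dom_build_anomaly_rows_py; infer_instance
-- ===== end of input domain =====

-- B orders the items by an LSD radix scheme — one stable sort on row_index alone, then a single
-- stable bucketing pass on severity, buckets concatenated — instead of A's composite-key sort,
-- and builds each row by an inner per-field pass (objective: alternative decomposition).


-- ===== shared Python-language helpers (dict.get, `or`, the row_index coercion both sources share) =====

-- d.get(k) on the association-list encoding of a dict: first match
def aget {ν : Type} (d : List (String × ν)) (k : String) : Option ν :=
  (d.find? (fun p => p.1 == k)).map (fun p => p.2)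

-- int(item.get("row_index") or 0); the `.getD 0` covers exactly the ValueError inputs
-- excluded by Pre_ below (both sources use this very key expression)
def rowKey (item : List (String × String)) : Int :=
  match aget item "row_index" with
  | none => 0
  | some s => if s = "" then 0 else (PySem.Int.ofStr? s).getD 0

-- `x or d` on an Optional[str] (falsy: None and "")
def orStr (v : Option String) (d : String) : String :=
  match v with
  | none => d
  | some s => if s = "" then d else s

-- `x or y` on two Optional[str]
def orOpt (v w : Option String) : Option String :=
  match v with
  | none => w
  | some s => if s = "" then w else some s

-- ===== PORT A =====

-- _escape_md(value) on an Optional[str] argument (None -> "")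
def escapeMd (v : Option String) : String :=
  PySem.Str.replace (PySem.Str.replace (PySem.Str.replace (v.getD "") "|" "\\|") "\n" " ") "\r" " "

-- _severity_sort_key(value) = _SEVERITY_ORDER.get(value, 99)
def sevSortKey (s : String) : Int :=
  (aget [("high", (0 : Int)), ("medium", 1), ("low", 2)] s).getD 99

-- severity component of A's sort key: _severity_sort_key(str(item.get("severity", "")))
def sevKey (item : List (String × String)) : Int :=
  sevSortKey ((aget item "severity").getD "")

-- one formatted row for an item (the body of A's for-loop, with its five named variables)
def formatRow (item : List (String × String)) : List String :=
  [ escapeMd (aget item "row_index"),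
    escapeMd (some (orStr (aget item "rule_id") "LLM")),
    escapeMd (orOpt (aget item "rule_name") (aget item "reasoning")),
    escapeMd (aget item "severity"),
    escapeMd (aget item "actual_value") ]

def build_anomaly_rows_py (anomalies : List (List (String × String))) : List (List String) :=
  if anomalies = [] then []
  else
    let sorted_items := PySem.List.sorted2 anomalies sevKey rowKey
    let display_items :=
      if sorted_items.length > 100 then PySem.List.slice sorted_items none (some 50)
      else sorted_items
    display_items.foldl (fun rows item => rows ++ [formatRow item]) []

-- ===== PORT B =====

-- B's bucketing loop over the row-sorted list: four severity buckets in traversal order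
def sevBuckets : List (List (String × String)) →
    List (List (String × String)) × List (List (String × String)) ×
    List (List (String × String)) × List (List (String × String))
  | [] => ([], [], [], [])
  | it :: rest =>
    let b := sevBuckets rest
    let sev := (aget it "severity").getD ""
    if sev = "high" then (it :: b.1, b.2.1, b.2.2.1, b.2.2.2)
    else if sev = "medium" then (b.1, it :: b.2.1, b.2.2.1, b.2.2.2)
    else if sev = "low" then (b.1, b.2.1, it :: b.2.2.1, b.2.2.2)
    else (b.1, b.2.1, b.2.2.1, it :: b.2.2.2)

-- B's row loop: for each item, an inner pass over the five raw field values
def renderRows : List (List (String × String)) → List (List String)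
  | [] => []
  | it :: rest =>
      ([ aget it "row_index",
         some (orStr (aget it "rule_id") "LLM"),
         orOpt (aget it "rule_name") (aget it "reasoning"),
         aget it "severity",
         aget it "actual_value" ].map
        (fun raw => PySem.Str.replace (PySem.Str.replace
          (PySem.Str.replace (raw.getD "") "|" "\\|") "\n" " ") "\r" " "))
      :: renderRows rest

def build_anomaly_rows_py_alt (anomalies : List (List (String × String))) : List (List String) :=
  let by_row := PySem.List.sorted anomalies rowKey
  let b := sevBuckets by_row
  let ordered := b.1 ++ b.2.1 ++ b.2.2.1 ++ b.2.2.2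
  -- ordered[:50] with natural bounds is List.take 50 (PySem.List.slice_to_natCast)
  let display := if ordered.length > 100 then ordered.take 50 else ordered
  renderRows display

-- ===== PRECONDITION & SPEC =====
-- Pre_ excludes exactly the inputs where Python A raises ValueError: an item whose
-- "row_index" value is a non-empty string that int() cannot parse.
def Pre_build_anomaly_rows_py (anomalies : List (List (String × String))) : Prop :=
  (anomalies.all (fun item =>
    match aget item "row_index" with
    | none => true
    | some s => s == "" || (PySem.Int.ofStr? s).isSome)) = true
instance (anomalies : List (List (String × String))) : Decidable (Pre_build_anomaly_rows_py anomalies) := by unfold Pre_build_anomaly_rows_py; infer_instance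

def pvWitness_build_anomaly_rows_py : (List (List (String × String))) :=
  [[("severity", "low"), ("row_index", "7"), ("rule_id", "R1")],
   [("severity", "high"), ("row_index", " 3 ")],
   [("severity", "odd"), ("reasoning", "a|b")]]

def Spec_build_anomaly_rows_py (anomalies : List (List (String × String))) (out : List (List String)) : Prop := out = build_anomaly_rows_py_alt anomalies
instance (anomalies : List (List (String × String))) (out : List (List String)) : Decidable (Spec_build_anomaly_rows_py anomalies out) := by unfold Spec_build_anomaly_rows_py; infer_instance

-- ===== CLAIM (what is proved, stated in full; the proofs are below) =====
def Claim_equal_build_anomaly_rows_py : Prop := ∀ (anomalies : List (List (String × String))), Dom_build_anomaly_rows_py anomalies → Pre_build_anomaly_rows_py anomalies → Spec_build_anomaly_rows_py anomalies (build_anomaly_rows_py anomalies)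

-- ===== LEMMAS AND PROOFS =====

-- insertBy passes over a prefix none of whose elements x goes before
theorem insertBy_append_left {α : Type} (before : α → α → Bool) (x : α) (u v : List α)
    (h : ∀ y ∈ u, before x y = false) :
    PySem.List.insertBy before x (u ++ v) = u ++ PySem.List.insertBy before x v := by
  induction u with
  | nil => simp
  | cons z u ih =>
    have hz := h z (by simp)
    simp only [List.cons_append, PySem.List.insertBy, hz, Bool.false_eq_true, if_false]
    rw [ih (fun y hy => h y (by simp [hy]))]

-- insertBy stops before a suffix all of whose elements x goes before
theorem insertBy_append_right {α : Type} (before : α → α → Bool) (x : α) (u v : List α)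
    (h : ∀ y ∈ v, before x y = true) :
    PySem.List.insertBy before x (u ++ v) = PySem.List.insertBy before x u ++ v := by
  induction u with
  | nil =>
    cases v with
    | nil => rfl
    | cons z v => simp [PySem.List.insertBy, h z (by simp)]
  | cons z u ih =>
    simp only [List.cons_append, PySem.List.insertBy]
    cases hz : before x z <;> simp [ih]

-- insertBy only looks at `before x ·`
theorem insertBy_congr {α : Type} (b b' : α → α → Bool) (x : α) (u : List α)
    (h : ∀ y ∈ u, b x y = b' x y) :
    PySem.List.insertBy b x u = PySem.List.insertBy b' x u := by
  induction u with
  | nil => rfl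
  | cons z u ih =>
    simp only [PySem.List.insertBy, h z (by simp)]
    cases hz : b' x z <;> simp [ih (fun y hy => h y (by simp [hy]))]

-- the lexicographic comparison sorted2 uses
def lexLt (x y : List (String × String)) : Bool :=
  decide (sevKey x < sevKey y) || (!decide (sevKey y < sevKey x) && decide (rowKey x < rowKey y))

-- the row_index-only comparison the first radix pass uses
def rowLt (x y : List (String × String)) : Bool :=
  decide (rowKey x < rowKey y)

-- sevSortKey as a chain of string tests (the form B's bucketing pass evaluates)
theorem sevSortKey_ite (s : String) :
    sevSortKey s =
      if s = "high" then 0 else if s = "medium" then 1 else if s = "low" then 2 else 99 := by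
  unfold sevSortKey aget
  by_cases h1 : s = "high"
  · subst h1; rfl
  rw [if_neg h1]
  by_cases h2 : s = "medium"
  · subst h2; rfl
  rw [if_neg h2]
  by_cases h3 : s = "low"
  · subst h3; rfl
  rw [if_neg h3]
  have b1 : ("high" == s) = false := by simpa using Ne.symm h1
  have b2 : ("medium" == s) = false := by simpa using Ne.symm h2
  have b3 : ("low" == s) = false := by simpa using Ne.symm h3
  simp [List.find?, b1, b2, b3]

theorem sevKey_ite (it : List (String × String)) :
    sevKey it =
      if (aget it "severity").getD "" = "high" then 0
      else if (aget it "severity").getD "" = "medium" then 1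
      else if (aget it "severity").getD "" = "low" then 2 else 99 := by
  unfold sevKey
  exact sevSortKey_ite _

theorem sevKey_cases (item : List (String × String)) :
    sevKey item = 0 ∨ sevKey item = 1 ∨ sevKey item = 2 ∨ sevKey item = 99 := by
  rw [sevKey_ite]; split_ifs <;> simp

-- a severity-i bucket of xs: the items whose severity key is i, in input order
def bkt (i : Int) (xs : List (List (String × String))) : List (List (String × String)) :=
  xs.filter (fun a => sevKey a = i)

-- sorted bucket i
def sb (i : Int) (xs : List (List (String × String))) : List (List (String × String)) :=
  PySem.List.sorted (bkt i xs) rowKey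

theorem mem_sb {i : Int} {xs : List (List (String × String))} {y : List (String × String)}
    (h : y ∈ sb i xs) : sevKey y = i := by
  have := (PySem.List.mem_sorted _ _ _ _).1 h
  simpa using (List.mem_filter.1 this).2

theorem sorted_concat (key : List (String × String) → Int) (xs : List (List (String × String))) (x : List (String × String)) :
    PySem.List.sorted (xs ++ [x]) key =
      PySem.List.insertBy (fun a b => decide (key a < key b)) x (PySem.List.sorted xs key) := by
  rw [PySem.List.sorted_eq_foldl_insertBy, PySem.List.sorted_eq_foldl_insertBy, List.foldl_append]
  rfl

theorem sorted2_concat (xs : List (List (String × String))) (x : List (String × String)) :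
    PySem.List.sorted2 (xs ++ [x]) sevKey rowKey =
      PySem.List.insertBy lexLt x (PySem.List.sorted2 xs sevKey rowKey) := by
  show List.foldl _ [] (xs ++ [x]) = _
  rw [List.foldl_append]
  rfl

theorem bkt_concat (i : Int) (xs : List (List (String × String))) (x : List (String × String)) :
    bkt i (xs ++ [x]) = bkt i xs ++ if sevKey x = i then [x] else [] := by
  simp [bkt, List.filter_append]
  split_ifs with h <;> simp [List.filter, h]

theorem sb_concat_eq {i : Int} {x : List (String × String)} (xs : List (List (String × String)))
    (h : sevKey x = i) :
    sb i (xs ++ [x]) = PySem.List.insertBy rowLt x (sb i xs) := by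
  unfold sb
  rw [bkt_concat, if_pos h, sorted_concat]
  rfl

theorem sb_concat_ne {j : Int} {x : List (String × String)} (xs : List (List (String × String)))
    (h : sevKey x ≠ j) :
    sb j (xs ++ [x]) = sb j xs := by
  unfold sb
  rw [bkt_concat, if_neg h, List.append_nil]

-- the composite-key stable sort is the concatenation of the per-severity buckets,
-- each stable-sorted by row_index alone
theorem sorted2_eq_buckets (xs : List (List (String × String))) :
    PySem.List.sorted2 xs sevKey rowKey = sb 0 xs ++ sb 1 xs ++ sb 2 xs ++ sb 99 xs := by
  induction xs using List.reverseRecOn with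
  | nil => rfl
  | append_singleton xs x ih =>
    rw [sorted2_concat, ih]
    have hlt : ∀ y : List (String × String), sevKey x < sevKey y → lexLt x y = true := by
      intro y hy; simp [lexLt, hy]
    have hgt : ∀ y : List (String × String), sevKey y < sevKey x → lexLt x y = false := by
      intro y hy; simp [lexLt]; omega
    rcases sevKey_cases x with h | h | h | h
    · simp only [List.append_assoc]
      rw [insertBy_append_right lexLt x (sb 0 xs) _
            (by intro y hy; simp only [List.mem_append] at hy
                rcases hy with hy | hy | hy <;> exact hlt y (by rw [mem_sb hy, h]; norm_num)),
          insertBy_congr lexLt rowLt x (sb 0 xs)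
            (fun y hy => by simp [lexLt, rowLt, mem_sb hy, h]),
          ← sb_concat_eq xs h, sb_concat_ne xs (show sevKey x ≠ 1 by omega), sb_concat_ne xs (show sevKey x ≠ 2 by omega),
          sb_concat_ne xs (show sevKey x ≠ 99 by omega)]
    · simp only [List.append_assoc]
      rw [insertBy_append_left lexLt x (sb 0 xs) _
            (by intro y hy; exact hgt y (by rw [mem_sb hy, h]; norm_num)),
          insertBy_append_right lexLt x (sb 1 xs) _
            (by intro y hy; simp only [List.mem_append] at hy
                rcases hy with hy | hy <;> exact hlt y (by rw [mem_sb hy, h]; norm_num)),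
          insertBy_congr lexLt rowLt x (sb 1 xs)
            (fun y hy => by simp [lexLt, rowLt, mem_sb hy, h]),
          ← sb_concat_eq xs h, sb_concat_ne xs (show sevKey x ≠ 0 by omega), sb_concat_ne xs (show sevKey x ≠ 2 by omega),
          sb_concat_ne xs (show sevKey x ≠ 99 by omega)]
    · simp only [List.append_assoc]
      rw [insertBy_append_left lexLt x (sb 0 xs) _
            (by intro y hy; exact hgt y (by rw [mem_sb hy, h]; norm_num)),
          insertBy_append_left lexLt x (sb 1 xs) _
            (by intro y hy; exact hgt y (by rw [mem_sb hy, h]; norm_num)),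
          insertBy_append_right lexLt x (sb 2 xs) _
            (by intro y hy; exact hlt y (by rw [mem_sb hy, h]; norm_num)),
          insertBy_congr lexLt rowLt x (sb 2 xs)
            (fun y hy => by simp [lexLt, rowLt, mem_sb hy, h]),
          ← sb_concat_eq xs h, sb_concat_ne xs (show sevKey x ≠ 0 by omega), sb_concat_ne xs (show sevKey x ≠ 1 by omega),
          sb_concat_ne xs (show sevKey x ≠ 99 by omega)]
    · simp only [List.append_assoc]
      rw [insertBy_append_left lexLt x (sb 0 xs) _
            (by intro y hy; exact hgt y (by rw [mem_sb hy, h]; norm_num)),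
          insertBy_append_left lexLt x (sb 1 xs) _
            (by intro y hy; exact hgt y (by rw [mem_sb hy, h]; norm_num)),
          insertBy_append_left lexLt x (sb 2 xs) _
            (by intro y hy; exact hgt y (by rw [mem_sb hy, h]; norm_num)),
          insertBy_congr lexLt rowLt x (sb 99 xs)
            (fun y hy => by simp [lexLt, rowLt, mem_sb hy, h]),
          ← sb_concat_eq xs h, sb_concat_ne xs (show sevKey x ≠ 0 by omega), sb_concat_ne xs (show sevKey x ≠ 1 by omega),
          sb_concat_ne xs (show sevKey x ≠ 2 by omega)]

-- B's bucketing pass computes exactly the four severity filters of its input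
theorem sevBuckets_eq (xs : List (List (String × String))) :
    sevBuckets xs = (bkt 0 xs, bkt 1 xs, bkt 2 xs, bkt 99 xs) := by
  induction xs with
  | nil => rfl
  | cons it xs ih =>
    have hk := sevKey_ite it
    simp only [sevBuckets, ih]
    by_cases h1 : (aget it "severity").getD "" = "high"
    · rw [if_pos h1] at hk ⊢
      simp [bkt, hk]
    · rw [if_neg h1] at hk ⊢
      by_cases h2 : (aget it "severity").getD "" = "medium"
      · rw [if_pos h2] at hk ⊢
        simp [bkt, hk]
      · rw [if_neg h2] at hk ⊢
        by_cases h3 : (aget it "severity").getD "" = "low"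
        · rw [if_pos h3] at hk ⊢
          simp [bkt, hk]
        · rw [if_neg h3] at hk ⊢
          simp [bkt, hk]

-- filtering commutes with inserting into a row-sorted list
theorem filter_insertBy (p : List (String × String) → Bool) (x : List (String × String))
    (l : List (List (String × String)))
    (hl : l.Pairwise (fun a b => rowKey a ≤ rowKey b)) :
    (PySem.List.insertBy rowLt x l).filter p =
      if p x then PySem.List.insertBy rowLt x (l.filter p) else l.filter p := by
  induction l with
  | nil =>
    simp [PySem.List.insertBy, List.filter_cons]
  | cons z l ih =>
    rw [List.pairwise_cons] at hl
    simp only [PySem.List.insertBy]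
    cases hxz : rowLt x z
    · -- x goes after z: recurse
      simp only [Bool.false_eq_true, if_false, List.filter_cons, ih hl.2]
      cases hpz : p z <;> cases hpx : p x <;>
        simp [PySem.List.insertBy, hxz]
    · -- x goes first; every kept element of z :: l comes after x
      have hall : ∀ y ∈ (z :: l).filter p, rowLt x y = true := by
        intro y hy
        have hy' := List.mem_filter.1 hy
        have hzy : rowKey z ≤ rowKey y := by
          rcases List.mem_cons.1 hy'.1 with rfl | hm
          · exact le_refl _
          · exact hl.1 y hm
        have hxz' : rowKey x < rowKey z := by simpa [rowLt] using hxz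
        simp [rowLt]; omega
      have hins : PySem.List.insertBy rowLt x ((z :: l).filter p)
          = x :: (z :: l).filter p := by
        have := insertBy_append_right rowLt x [] ((z :: l).filter p) hall
        simpa [PySem.List.insertBy] using this
      rw [if_pos rfl, List.filter_cons, hins]

-- filtering commutes with the stable row_index sort
theorem filter_sorted (p : List (String × String) → Bool) (xs : List (List (String × String))) :
    (PySem.List.sorted xs rowKey).filter p = PySem.List.sorted (xs.filter p) rowKey := by
  induction xs using List.reverseRecOn with
  | nil => rfl
  | append_singleton xs x ih =>
    rw [sorted_concat,
        show (fun a b => decide (rowKey a < rowKey b)) = rowLt from rfl,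
        filter_insertBy p x _ (PySem.List.sorted_pairwise xs rowKey), ih, List.filter_append]
    by_cases hp : p x = true
    · rw [if_pos hp, List.filter_cons, if_pos hp, List.filter_nil, sorted_concat,
          show (fun a b => decide (rowKey a < rowKey b)) = rowLt from rfl]
    · rw [if_neg hp, List.filter_cons, if_neg hp, List.filter_nil, List.append_nil]

-- bucket i of the row-sorted list is the sorted bucket sb i
theorem bkt_sorted (i : Int) (xs : List (List (String × String))) :
    bkt i (PySem.List.sorted xs rowKey) = sb i xs := by
  unfold bkt sb
  exact filter_sorted _ xs

-- B's row loop is the map of A's per-item row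
theorem renderRows_eq_map (l : List (List (String × String))) :
    renderRows l = l.map formatRow := by
  induction l with
  | nil => rfl
  | cons it rest ih =>
    simp only [renderRows, List.map, ih]
    rfl

theorem build_eq (anomalies : List (List (String × String))) :
    build_anomaly_rows_py anomalies = build_anomaly_rows_py_alt anomalies := by
  simp only [build_anomaly_rows_py, build_anomaly_rows_py_alt]
  rw [sevBuckets_eq]
  have hord :
      bkt 0 (PySem.List.sorted anomalies rowKey) ++ bkt 1 (PySem.List.sorted anomalies rowKey) ++
      bkt 2 (PySem.List.sorted anomalies rowKey) ++ bkt 99 (PySem.List.sorted anomalies rowKey) =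
      PySem.List.sorted2 anomalies sevKey rowKey := by
    rw [bkt_sorted, bkt_sorted, bkt_sorted, bkt_sorted, sorted2_eq_buckets]
  by_cases h : anomalies = []
  · subst h; rfl
  · simp only [if_neg h]
    rw [renderRows_eq_map]
    simp only [List.append_assoc] at hord ⊢
    rw [hord, PySem.List.foldl_append_singleton_eq_map]
    by_cases hlen : (PySem.List.sorted2 anomalies sevKey rowKey).length > 100
    · rw [if_pos hlen, if_pos hlen, PySem.List.slice_to _ (by norm_num)]
      rfl
    · rw [if_neg hlen, if_neg hlen]
      exact List.nil_append _

-- ===== VERDICT (by name: the statement is the Claim_ definition above) =====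
theorem build_anomaly_rows_py_spec : Claim_equal_build_anomaly_rows_py := by
  intro anomalies _ _
  exact build_eq anomalies
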